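-- pv_equiv track=rewrite | github.com/Manya1921/PasswordAnalyzer | password-strength-analyzer/password-strength-analyzer/src/analyzer/metrics.py | calculate_character_diversity
-- ===== SOURCE A (Python) =====
-- def calculate_character_diversity(password):
--     character_types = {
--         'lowercase': any(c.islower() for c in password),
--         'uppercase': any(c.isupper() for c in password),
--         'digits': any(c.isdigit() for c in password),
--         'special': any(not c.isalnum() for c in password),
--     }
--     diversity_score = sum(character_types.values())
--     return diversity_score
-- ===== SOURCE B (Python) =====
-- def calculate_character_diversity(password):
--     lo = up = di = sp = False
--     for c in password:
--         lo = lo or c.islower()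
--         up = up or c.isupper()
--         di = di or c.isdigit()
--         sp = sp or (not c.isalnum())
--         if lo and up and di and sp:
--             break
--     return lo + up + di + sp
-- ===== Notes on version B (the rewrite author's own statement) =====
-- stated objective: faster
-- what changed: Replaces four separate any() scans over the password with a single pass maintaining four boolean flags and breaking early once all are set.
import Mathlib
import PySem

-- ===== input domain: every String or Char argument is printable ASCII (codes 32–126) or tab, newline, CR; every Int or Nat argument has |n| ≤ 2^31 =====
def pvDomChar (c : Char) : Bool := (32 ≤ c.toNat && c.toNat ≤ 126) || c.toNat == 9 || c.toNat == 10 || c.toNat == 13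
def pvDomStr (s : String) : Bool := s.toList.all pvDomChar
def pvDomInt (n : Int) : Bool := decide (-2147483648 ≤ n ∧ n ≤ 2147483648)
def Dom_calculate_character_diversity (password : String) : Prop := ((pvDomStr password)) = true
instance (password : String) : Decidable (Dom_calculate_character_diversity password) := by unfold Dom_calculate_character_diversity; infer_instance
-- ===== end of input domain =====

-- B is a single pass with four flags and an early break instead of A's four any() scans (same cost class).
-- ===== PORT A =====
def calculate_character_diversity (password : String) : Int :=
  let character_types : PySem.Dict String Bool :=
    PySem.Dict.insert (PySem.Dict.insert (PySem.Dict.insert (PySem.Dict.insert PySem.Dict.empty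
      "lowercase" (password.toList.any (fun c => PySem.Chars.islower c)))
      "uppercase" (password.toList.any (fun c => PySem.Chars.isupper c)))
      "digits" (password.toList.any (fun c => PySem.Chars.isdigit c)))
      "special" (password.toList.any (fun c => !(PySem.Chars.isalnum c)))
  let diversity_score : Int :=
    (character_types.values).foldl (fun acc b => acc + (if b then 1 else 0)) 0
  diversity_score

-- ===== PORT B =====
def pvLoopB : List Char → Bool × Bool × Bool × Bool → Bool × Bool × Bool × Bool
  | [], s => s
  | c :: cs, (lo, up, di, sp) =>
    let lo := lo || PySem.Chars.islower c
    let up := up || PySem.Chars.isupper c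
    let di := di || PySem.Chars.isdigit c
    let sp := sp || !(PySem.Chars.isalnum c)
    if lo && up && di && sp then (lo, up, di, sp) else pvLoopB cs (lo, up, di, sp)

def calculate_character_diversity_alt (password : String) : Int :=
  let s := pvLoopB password.toList (false, false, false, false)
  (if s.1 then 1 else 0) + (if s.2.1 then 1 else 0) + (if s.2.2.1 then 1 else 0) + (if s.2.2.2 then 1 else 0)

-- ===== PRECONDITION & SPEC =====
def Spec_calculate_character_diversity (password : String) (out : Int) : Prop := out = calculate_character_diversity_alt password
instance (password : String) (out : Int) : Decidable (Spec_calculate_character_diversity password out) := by unfold Spec_calculate_character_diversity; infer_instance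

-- ===== CLAIM (what is proved, stated in full; the proofs are below) =====
def Claim_equal_calculate_character_diversity : Prop := ∀ (password : String), Dom_calculate_character_diversity password → Spec_calculate_character_diversity password (calculate_character_diversity password)

-- ===== LEMMAS AND PROOFS =====
theorem pvLoopB_eq (l : List Char) (lo up di sp : Bool) :
    pvLoopB l (lo, up, di, sp) =
      (lo || l.any (fun c => PySem.Chars.islower c),
       up || l.any (fun c => PySem.Chars.isupper c),
       di || l.any (fun c => PySem.Chars.isdigit c),
       sp || l.any (fun c => !(PySem.Chars.isalnum c))) := by
  induction l generalizing lo up di sp with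
  | nil => simp [pvLoopB]
  | cons c cs ih =>
    simp only [pvLoopB, List.any_cons]
    split_ifs with h
    · simp_all
      constructor
      · cases lo <;> simp_all
      constructor
      · cases up <;> simp_all
      constructor
      · cases di <;> simp_all
      · cases sp <;> simp_all
    · rw [ih]; simp [Bool.or_assoc]

-- ===== VERDICT (by name: the statement is the Claim_ definition above) =====
theorem calculate_character_diversity_spec : Claim_equal_calculate_character_diversity := by
  intro password _
  unfold Spec_calculate_character_diversity calculate_character_diversity calculate_character_diversity_alt
  rw [pvLoopB_eq]
  simp [PySem.Dict.insert, PySem.Dict.empty, PySem.Dict.values,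
    List.foldl, List.any_eq_true]
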